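-- pv_equiv track=rewrite | github.com/mateo927/Site-web | BAC/2025-NSI (1)/sujets/48/25-NSI-48.py | point_le_plus_proche
-- ===== SOURCE A (Python) =====
-- def distance_carre(point1, point2):
--     """ Calcule et renvoie la distance au carre entre
--     deux points."""
--     return (point1[0]-point2[0])**2 + (point1[1]-point2[1])**2
--
-- def point_le_plus_proche(depart, tab):
--     """
--     >>> distance_carre((1, 0), (5, 3))
--     25
--     >>> distance_carre((1, 0), (0, 1))
--     2
--     >>> point_le_plus_proche((0, 0), [(7, 9), (2, 5), (5, 2)])
--     (2, 5)
--     >>> point_le_plus_proche((5, 2), [(7, 9), (2, 5), (5, 2)])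
--     (5, 2)
--
--     Renvoie les coordonnées du premier point du tableau tab se
--     trouvant à la plus courte distance du point depart."""
--     min_point = tab[0]
--     min_dist = distance_carre(depart,min_point)
--     for i in range(1, len(tab)):
--         if distance_carre(tab[i], depart) < min_dist:
--             min_point = tab[i]
--             min_dist = distance_carre(tab[i], depart)
--     return min_point
-- ===== SOURCE B (Python) =====
-- def distance_carre(point1, point2):
--     """ Calcule et renvoie la distance au carre entre
--     deux points."""
--     return (point1[0]-point2[0])**2 + (point1[1]-point2[1])**2
--
-- def point_le_plus_proche(depart, tab):
--     return sorted(tab, key=lambda p: distance_carre(p, depart))[0]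
-- ===== Notes on version B (the rewrite author's own statement) =====
-- stated objective: idiomatic
-- what changed: Replaces the manual index loop with running min/min-distance state by a stable sort of the whole list keyed on squared distance, returning its first element (stability preserves A's first-minimum tie-breaking).
import Mathlib
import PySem

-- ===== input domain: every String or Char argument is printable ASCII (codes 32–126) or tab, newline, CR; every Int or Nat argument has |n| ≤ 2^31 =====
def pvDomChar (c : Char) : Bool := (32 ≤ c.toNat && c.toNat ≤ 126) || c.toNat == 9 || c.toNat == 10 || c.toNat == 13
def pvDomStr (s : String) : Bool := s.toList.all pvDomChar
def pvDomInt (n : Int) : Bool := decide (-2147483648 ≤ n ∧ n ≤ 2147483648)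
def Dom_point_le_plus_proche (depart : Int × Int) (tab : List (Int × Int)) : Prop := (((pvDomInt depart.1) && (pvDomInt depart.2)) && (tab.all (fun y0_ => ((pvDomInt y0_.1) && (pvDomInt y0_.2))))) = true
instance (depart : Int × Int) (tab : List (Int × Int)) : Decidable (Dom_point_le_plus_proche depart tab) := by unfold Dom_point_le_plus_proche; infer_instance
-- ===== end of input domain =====

-- B replaces A's manual running-minimum loop by a stable sort on squared distance and takes the head (idiomatic; not faster).


-- ===== PORT A =====
def distance_carre (point1 point2 : Int × Int) : Int :=
  (point1.1 - point2.1) ^ 2 + (point1.2 - point2.2) ^ 2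

def point_le_plus_proche (depart : Int × Int) (tab : List (Int × Int)) : Int × Int :=
  -- tab[0] raises IndexError on empty tab: excluded by Pre_; default never used inside Pre_
  let minPoint := PySem.List.pyGetD tab 0 (0, 0)
  let minDist := distance_carre depart minPoint
  (List.foldl
    (fun (st : (Int × Int) × Int) i =>
      if distance_carre (PySem.List.pyGetD tab i (0, 0)) depart < st.2 then
        (PySem.List.pyGetD tab i (0, 0), distance_carre (PySem.List.pyGetD tab i (0, 0)) depart)
      else st)
    (minPoint, minDist)
    (PySem.List.pyRange 1 (PySem.List.len tab))).1

-- ===== PORT B =====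
def point_le_plus_proche_alt (depart : Int × Int) (tab : List (Int × Int)) : Int × Int :=
  -- sorted(tab, key=...)[0]; [0] raises IndexError on empty tab: excluded by Pre_
  (PySem.List.sorted tab (fun p => distance_carre p depart)).headD (0, 0)

-- ===== PRECONDITION & SPEC =====
-- A (tab[0]) and B ([0]) both raise IndexError on the empty list.
def Pre_point_le_plus_proche (depart : Int × Int) (tab : List (Int × Int)) : Prop := tab ≠ []
instance (depart : Int × Int) (tab : List (Int × Int)) : Decidable (Pre_point_le_plus_proche depart tab) := by unfold Pre_point_le_plus_proche; infer_instance
def pvWitness_point_le_plus_proche : (Int × Int) × (List (Int × Int)) := ((0, 0), [(7, 9), (2, 5), (5, 2)])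

def Spec_point_le_plus_proche (depart : Int × Int) (tab : List (Int × Int)) (out : Int × Int) : Prop := out = point_le_plus_proche_alt depart tab
instance (depart : Int × Int) (tab : List (Int × Int)) (out : Int × Int) : Decidable (Spec_point_le_plus_proche depart tab out) := by unfold Spec_point_le_plus_proche; infer_instance

-- ===== CLAIM (what is proved, stated in full; the proofs are below) =====
def Claim_equal_point_le_plus_proche : Prop := ∀ (depart : Int × Int) (tab : List (Int × Int)), Dom_point_le_plus_proche depart tab → Pre_point_le_plus_proche depart tab → Spec_point_le_plus_proche depart tab (point_le_plus_proche depart tab)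

-- ===== LEMMAS AND PROOFS =====

-- A's loop collapsed: carrying (min point, its key) and only the point are the same fold.
theorem foldl_pair_fst (k : Int × Int → Int) :
    ∀ (t : List (Int × Int)) (mp : Int × Int),
      (List.foldl (fun (st : (Int × Int) × Int) x => if k x < st.2 then (x, k x) else st) (mp, k mp) t).1
        = List.foldl (fun mp x => if k x < k mp then x else mp) mp t := by
  intro t
  induction t with
  | nil => intro mp; rfl
  | cons x xs ih =>
      intro mp
      by_cases h : k x < k mp
      · simp only [List.foldl_cons, if_pos h]; exact ih x
      · simp only [List.foldl_cons, if_neg h]; exact ih mp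

-- Head of the stable insertion-sort fold over a nonempty accumulator = A's running first-minimum.
theorem head_foldl_insertBy (k : Int × Int → Int) :
    ∀ (t : List (Int × Int)) (a : Int × Int) (as : List (Int × Int)),
      (List.foldl (fun acc x => PySem.List.insertBy (fun p q => decide (k p < k q)) x acc) (a :: as) t).head?
        = some (List.foldl (fun mp x => if k x < k mp then x else mp) a t) := by
  intro t
  induction t with
  | nil => intro a as; rfl
  | cons x xs ih =>
      intro a as
      by_cases h : k x < k a
      · simp only [List.foldl_cons, PySem.List.insertBy, decide_eq_true_eq, if_pos h]
        exact ih x (a :: as)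
      · simp only [List.foldl_cons, PySem.List.insertBy, decide_eq_true_eq, if_neg h]
        exact ih a _

theorem distance_carre_comm (p q : Int × Int) : distance_carre p q = distance_carre q p := by
  unfold distance_carre; ring

-- ===== VERDICT (by name: the statement is the Claim_ definition above) =====
theorem point_le_plus_proche_spec : Claim_equal_point_le_plus_proche := by
  intro depart tab _ hpre
  obtain ⟨h, t, rfl⟩ : ∃ h t, tab = h :: t := by
    cases tab with
    | nil => exact absurd rfl hpre
    | cons h t => exact ⟨h, t, rfl⟩
  unfold Spec_point_le_plus_proche point_le_plus_proche point_le_plus_proche_alt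
  have hA :
      (List.foldl
        (fun (st : (Int × Int) × Int) i =>
          if distance_carre (PySem.List.pyGetD (h :: t) i (0, 0)) depart < st.2 then
            (PySem.List.pyGetD (h :: t) i (0, 0),
             distance_carre (PySem.List.pyGetD (h :: t) i (0, 0)) depart)
          else st)
        (PySem.List.pyGetD (h :: t) 0 (0, 0),
         distance_carre depart (PySem.List.pyGetD (h :: t) 0 (0, 0)))
        (PySem.List.pyRange 1 (PySem.List.len (h :: t)))).1
      = List.foldl (fun mp x => if distance_carre x depart < distance_carre mp depart then x else mp) h t := by
    rw [PySem.List.foldl_pyRange_pyGetD (h :: t) (0, 0)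
        (fun (st : (Int × Int) × Int) x =>
          if distance_carre x depart < st.2 then (x, distance_carre x depart) else st)
        _ (by norm_num)]
    simp only [PySem.List.pyGetD_zero_cons, Int.toNat_one, List.drop_succ_cons, List.drop_zero]
    rw [distance_carre_comm depart h]
    exact foldl_pair_fst (fun p => distance_carre p depart) t h
  have hB :
      (PySem.List.sorted (h :: t) (fun p => distance_carre p depart)).headD (0, 0)
      = List.foldl (fun mp x => if distance_carre x depart < distance_carre mp depart then x else mp) h t := by
    rw [PySem.List.sorted_eq_foldl_insertBy]
    simp only [List.foldl_cons, PySem.List.insertBy]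
    have hh := head_foldl_insertBy (fun p => distance_carre p depart) t h []
    simp [List.headD_eq_head?, hh]
  simp only [hA, hB]
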